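-- pv_equiv track=rewrite | github.com/lijinwei1237-gif/pff-pickup-check-v2 | pff_v2.py | find_best_col_by_name
-- ===== SOURCE A (Python) =====
-- def find_best_col_by_name(columns, candidates):
--     cols = list(columns)
--
--     def norm(s):
--         return str(s).strip().lower().replace("_", "").replace("-", "").replace(" ", "")
--
--     norm_map = {c: norm(c) for c in cols}
--
--     for cand in candidates:
--         cand_raw = str(cand).strip().lower()
--         for c in cols:
--             if str(c).strip().lower() == cand_raw:
--                 return c
--
--     for cand in candidates:
--         cand_norm = norm(cand)
--         for c, c_norm in norm_map.items():
--             if c_norm == cand_norm: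
--                 return c
--
--     for cand in candidates:
--         cand_norm = norm(cand)
--         for c, c_norm in norm_map.items():
--             if cand_norm in c_norm:
--                 return c
--
--     return None
-- ===== SOURCE B (Python) =====
-- def find_best_col_by_name(columns, candidates):
--     cols = list(columns)
--
--     def norm(s):
--         return str(s).strip().lower().replace("_", "").replace("-", "").replace(" ", "")
--
--     def classify(cand):
--         # best match for this single candidate: (0, col) exact, (1, col) normalized-equal,
--         # (2, col) normalized-substring, or None
--         raw = str(cand).strip().lower()
--         for c in cols:
--             if str(c).strip().lower() == raw:
--                 return (0, c)
--         cn = norm(cand)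
--         for c in cols:
--             if norm(c) == cn:
--                 return (1, c)
--         for c in cols:
--             if cn in norm(c):
--                 return (2, c)
--         return None
--
--     # single candidate-major pass: keep the lowest-rank match, earliest candidate wins ties
--     best = None
--     for cand in candidates:
--         r = classify(cand)
--         if r is not None and (best is None or r[0] < best[0]):
--             best = r
--             if r[0] == 0:
--                 break
--     return best[1] if best is not None else None
-- ===== Notes on version B (the rewrite author's own statement) =====
-- stated objective: alternative
-- what changed: Replaced A's three phase-major sweeps over all candidates (exact, then normalized-equal, then normalized-substring, with a precomputed norm dict) by a single candidate-major pass that classifies each candidate once into a match rank (0 exact / 1 normalized / 2 substring) and keeps the lowest-rank match, earliest candidate winning ties, breaking early on an exact match.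
import Mathlib
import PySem

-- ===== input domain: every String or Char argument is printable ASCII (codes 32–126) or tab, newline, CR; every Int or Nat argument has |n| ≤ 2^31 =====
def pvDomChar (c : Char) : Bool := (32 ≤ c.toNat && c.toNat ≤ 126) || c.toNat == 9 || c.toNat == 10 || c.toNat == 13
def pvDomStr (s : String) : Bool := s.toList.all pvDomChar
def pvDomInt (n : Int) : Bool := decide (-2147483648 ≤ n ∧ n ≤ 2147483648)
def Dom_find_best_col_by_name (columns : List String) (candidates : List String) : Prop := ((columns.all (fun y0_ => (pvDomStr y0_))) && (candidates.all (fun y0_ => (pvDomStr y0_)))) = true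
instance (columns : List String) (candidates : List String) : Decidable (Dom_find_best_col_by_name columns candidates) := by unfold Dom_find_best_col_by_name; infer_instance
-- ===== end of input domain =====

-- B replaces A's three phase-major sweeps by a single candidate-major pass that classifies
-- each candidate once (rank 0 exact / 1 normalized / 2 substring) and keeps the lowest-rank,
-- earliest-candidate match (objective: alternative; same asymptotic cost).

-- shared helper: both Pythons define the identical local 'norm'
def pvNorm (s : String) : String :=
  PySem.Str.replace (PySem.Str.replace (PySem.Str.replace
    (PySem.Str.lower (PySem.Str.strip s)) "_" "") "-" "") " " ""

-- ===== PORT A =====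
def find_best_col_by_name (columns : List String) (candidates : List String) : Option String :=
  let cols := columns
  let normMap : PySem.Dict String String :=
    cols.foldl (fun d c => d.insert c (pvNorm c)) PySem.Dict.empty
  match candidates.findSome? (fun cand =>
      let cand_raw := PySem.Str.lower (PySem.Str.strip cand)
      cols.find? (fun c => PySem.Str.lower (PySem.Str.strip c) == cand_raw)) with
  | some c => some c
  | none =>
    match candidates.findSome? (fun cand =>
        let cand_norm := pvNorm cand
        (normMap.items.find? (fun p => p.2 == cand_norm)).map Prod.fst) with
    | some c => some c
    | none =>
      candidates.findSome? (fun cand =>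
        let cand_norm := pvNorm cand
        (normMap.items.find? (fun p => PySem.Str.isIn cand_norm p.2)).map Prod.fst)

-- ===== PORT B =====
def pvClassify (cols : List String) (cand : String) : Option (Nat × String) :=
  let raw := PySem.Str.lower (PySem.Str.strip cand)
  match cols.find? (fun c => PySem.Str.lower (PySem.Str.strip c) == raw) with
  | some c => some (0, c)
  | none =>
    let cn := pvNorm cand
    match cols.find? (fun c => pvNorm c == cn) with
    | some c => some (1, c)
    | none =>
      match cols.find? (fun c => PySem.Str.isIn cn (pvNorm c)) with
      | some c => some (2, c)
      | none => none

def pvBetter (best : Option (Nat × String)) (r : Nat × String) : Bool :=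
  match best with
  | none => true
  | some b => decide (r.1 < b.1)

def pvBestLoop (cols : List String) : List String → Option (Nat × String) → Option (Nat × String)
  | [], best => best
  | cand :: rest, best =>
    match pvClassify cols cand with
    | none => pvBestLoop cols rest best
    | some r =>
      if pvBetter best r then
        (if r.1 = 0 then some r else pvBestLoop cols rest (some r))
      else pvBestLoop cols rest best

def find_best_col_by_name_alt (columns : List String) (candidates : List String) : Option String :=
  (pvBestLoop columns candidates none).map Prod.snd

-- ===== PRECONDITION & SPEC =====
def Spec_find_best_col_by_name (columns : List String) (candidates : List String) (out : Option String) : Prop := out = find_best_col_by_name_alt columns candidates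
instance (columns : List String) (candidates : List String) (out : Option String) : Decidable (Spec_find_best_col_by_name columns candidates out) := by unfold Spec_find_best_col_by_name; infer_instance

-- ===== CLAIM (what is proved, stated in full; the proofs are below) =====
def Claim_equal_find_best_col_by_name : Prop := ∀ (columns : List String) (candidates : List String), Dom_find_best_col_by_name columns candidates → Spec_find_best_col_by_name columns candidates (find_best_col_by_name columns candidates)

-- ===== LEMMAS AND PROOFS =====

-- proof-side selectors: first column matching a candidate exactly / by norm / by substring
def eSel (cols : List String) (cand : String) : Option String :=
  cols.find? (fun c => PySem.Str.lower (PySem.Str.strip c) == PySem.Str.lower (PySem.Str.strip cand))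
def nSel (cols : List String) (cand : String) : Option String :=
  cols.find? (fun c => pvNorm c == pvNorm cand)
def sSel (cols : List String) (cand : String) : Option String :=
  cols.find? (fun c => PySem.Str.isIn (pvNorm cand) (pvNorm c))

-- the value pvBestLoop computes from an empty accumulator
def pvSpecSel (cols : List String) (l : List String) : Option (Nat × String) :=
  match l.findSome? (eSel cols) with
  | some c => some (0, c)
  | none =>
    match l.findSome? (nSel cols) with
    | some c => some (1, c)
    | none => (l.findSome? (sSel cols)).map (fun c => (2, c))

-- the items list A's dict comprehension produces (ordered dedup of cols, paired with norms)
def pvAcc (acc : List (String × String)) (c : String) : List (String × String) :=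
  if acc.any (fun p => p.1 == c) then acc else acc ++ [(c, pvNorm c)]
def pvItems (cols : List String) : List (String × String) := cols.foldl pvAcc []

theorem pvItems_snd_aux (l : List String) : ∀ acc, (∀ p ∈ acc, p.2 = pvNorm p.1) →
    ∀ p ∈ l.foldl pvAcc acc, p.2 = pvNorm p.1 := by
  induction l with
  | nil => intro acc h; simpa using h
  | cons x xs ih =>
    intro acc h
    simp only [List.foldl_cons]
    refine ih _ ?_
    intro p hp
    unfold pvAcc at hp
    split at hp
    · exact h p hp
    · rcases List.mem_append.mp hp with h' | h'
      · exact h p h'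
      · simp at h'; subst h'; rfl

theorem pvItems_snd (cols : List String) : ∀ p ∈ pvItems cols, p.2 = pvNorm p.1 :=
  pvItems_snd_aux cols [] (by simp)

theorem pvItems_fst_aux (l : List String) : ∀ acc c,
    (c ∈ (l.foldl pvAcc acc).map Prod.fst ↔ c ∈ acc.map Prod.fst ∨ c ∈ l) := by
  induction l with
  | nil => intro acc c; simp
  | cons x xs ih =>
    intro acc c
    simp only [List.foldl_cons, ih, List.mem_cons]
    unfold pvAcc
    split
    · rename_i hany
      simp only [List.any_eq_true, beq_iff_eq] at hany
      obtain ⟨p, hp, hpe⟩ := hany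
      constructor
      · tauto
      · rintro (h | h | h)
        · tauto
        · subst h; left; exact List.mem_map.mpr ⟨p, hp, hpe⟩
        · tauto
    · simp only [List.map_append, List.mem_append]
      simp
      tauto

theorem pvItems_fst (cols : List String) (c : String) :
    c ∈ (pvItems cols).map Prod.fst ↔ c ∈ cols := by
  simpa [pvItems] using pvItems_fst_aux cols [] c

theorem items_build (cols : List String) :
    (cols.foldl (fun d c => d.insert c (pvNorm c)) PySem.Dict.empty).items = pvItems cols := by
  induction cols using List.reverseRecOn with
  | nil => rfl
  | append_singleton xs c ih =>
    rw [List.foldl_append, List.foldl_cons, List.foldl_nil]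
    rw [pvItems, List.foldl_append, List.foldl_cons, List.foldl_nil]
    show ((xs.foldl (fun d c => d.insert c (pvNorm c)) PySem.Dict.empty).insert c (pvNorm c)).items
      = pvAcc (pvItems xs) c
    have hc : (xs.foldl (fun d c => d.insert c (pvNorm c)) PySem.Dict.empty).contains c
        = decide (c ∈ (pvItems xs).map Prod.fst) := by
      rw [PySem.Dict.contains_eq_decide_mem_keys]
      simp only [PySem.Dict.keys, ih]
    unfold pvAcc
    by_cases hmem : c ∈ (pvItems xs).map Prod.fst
    · have hany : (pvItems xs).any (fun p => p.1 == c) = true := by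
        simp only [List.any_eq_true, beq_iff_eq]
        obtain ⟨p, hp, hpe⟩ := List.mem_map.mp hmem
        exact ⟨p, hp, hpe⟩
      rw [PySem.Dict.items_insert_of_contains _ _ (by rw [hc]; simpa using hmem), ih, hany]
      simp only [if_true]
      have : ∀ p ∈ pvItems xs, (if p.1 == c then (c, pvNorm c) else p) = p := by
        intro p hp
        by_cases h : p.1 = c
        · subst h
          rw [← pvItems_snd xs p hp]
          simp
        · simp [h]
      calc (pvItems xs).map (fun p => if p.1 == c then (c, pvNorm c) else p)
          = (pvItems xs).map id := List.map_congr_left this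
        _ = pvItems xs := List.map_id _
    · have hany : (pvItems xs).any (fun p => p.1 == c) = false := by
        simp only [List.any_eq_false, beq_iff_eq]
        intro p hp hpe
        exact hmem (List.mem_map.mpr ⟨p, hp, hpe⟩)
      rw [PySem.Dict.items_insert_of_not_contains _ _ (by rw [hc]; simpa using hmem), ih, hany]
      simp

theorem find?_pvItems (cols : List String) (q : String → Bool) :
    ((pvItems cols).find? (fun p => q p.2)).map Prod.fst = cols.find? (fun c => q (pvNorm c)) := by
  induction cols using List.reverseRecOn with
  | nil => rfl
  | append_singleton xs c ih =>
    rw [pvItems, List.foldl_append, List.foldl_cons, List.foldl_nil]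
    show ((pvAcc (pvItems xs) c).find? (fun p => q p.2)).map Prod.fst
      = (xs ++ [c]).find? (fun c => q (pvNorm c))
    rw [List.find?_append]
    unfold pvAcc
    by_cases hmem : c ∈ (pvItems xs).map Prod.fst
    · have hany : (pvItems xs).any (fun p => p.1 == c) = true := by
        simp only [List.any_eq_true, beq_iff_eq]
        obtain ⟨p, hp, hpe⟩ := List.mem_map.mp hmem
        exact ⟨p, hp, hpe⟩
      rw [hany]; simp only [if_true]
      rw [ih]
      cases hf : xs.find? (fun c => q (pvNorm c)) with
      | some y => simp
      | none =>
        have hcx : c ∈ xs := (pvItems_fst xs c).mp hmem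
        have : q (pvNorm c) = false := by
          have := List.find?_eq_none.mp hf
          simpa using this c hcx
        simp [this]
    · have hany : (pvItems xs).any (fun p => p.1 == c) = false := by
        simp only [List.any_eq_false, beq_iff_eq]
        intro p hp hpe
        exact hmem (List.mem_map.mpr ⟨p, hp, hpe⟩)
      rw [hany]
      simp only [Bool.false_eq_true, if_false, List.find?_append]
      cases hf : (pvItems xs).find? (fun p => q p.2) with
      | some y =>
        rw [hf] at ih
        simp [← ih]
      | none =>
        rw [hf] at ih
        simp only [Option.map_none] at ih
        simp only [← ih, Option.none_or]
        by_cases hq : q (pvNorm c)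
        · simp [hq]
        · simp [hq]

theorem classify_eq (cols : List String) (cand : String) :
    pvClassify cols cand =
      match eSel cols cand with
      | some c => some (0, c)
      | none =>
        match nSel cols cand with
        | some c => some (1, c)
        | none => (sSel cols cand).map (fun c => (2, c)) := by
  unfold pvClassify eSel nSel sSel
  cases he : cols.find? (fun c => PySem.Str.lower (PySem.Str.strip c) == PySem.Str.lower (PySem.Str.strip cand)) with
  | some c => simp [he]
  | none =>
    simp only [he]
    cases hn : cols.find? (fun c => pvNorm c == pvNorm cand) with
    | some c => simp
    | none =>
      cases hs : cols.find? (fun c => PySem.Str.isIn (pvNorm cand) (pvNorm c)) <;> simp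

theorem loop1 (cols : List String) (b : String) : ∀ l : List String,
    pvBestLoop cols l (some (1, b)) =
      match l.findSome? (eSel cols) with
      | some c => some (0, c)
      | none => some (1, b) := by
  intro l
  induction l with
  | nil => rfl
  | cons cand rest ih =>
    rw [pvBestLoop, classify_eq]
    rw [List.findSome?_cons]
    cases he : eSel cols cand with
    | some c => simp [pvBetter]
    | none =>
      cases hn : nSel cols cand with
      | some c => simpa [pvBetter] using ih
      | none =>
        cases hs : sSel cols cand with
        | some c => simpa [pvBetter] using ih
        | none => simpa using ih

theorem loop2 (cols : List String) (b : String) : ∀ l : List String,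
    pvBestLoop cols l (some (2, b)) =
      match l.findSome? (eSel cols) with
      | some c => some (0, c)
      | none =>
        match l.findSome? (nSel cols) with
        | some c => some (1, c)
        | none => some (2, b) := by
  intro l
  induction l with
  | nil => rfl
  | cons cand rest ih =>
    rw [pvBestLoop, classify_eq]
    rw [List.findSome?_cons, List.findSome?_cons]
    cases he : eSel cols cand with
    | some c => simp [pvBetter]
    | none =>
      cases hn : nSel cols cand with
      | some c => simp [pvBetter, loop1]
      | none =>
        cases hs : sSel cols cand with
        | some c => simpa [pvBetter] using ih
        | none => simpa using ih

theorem loop0 (cols : List String) : ∀ l : List String,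
    pvBestLoop cols l none = pvSpecSel cols l := by
  intro l
  induction l with
  | nil => rfl
  | cons cand rest ih =>
    rw [pvBestLoop, classify_eq]
    unfold pvSpecSel
    rw [List.findSome?_cons, List.findSome?_cons, List.findSome?_cons]
    cases he : eSel cols cand with
    | some c => simp [pvBetter]
    | none =>
      cases hn : nSel cols cand with
      | some c => simp [pvBetter, loop1]
      | none =>
        cases hs : sSel cols cand with
        | some c => simp [pvBetter, loop2]
        | none => simpa [pvSpecSel] using ih

theorem A_eq (cols : List String) (l : List String) :
    find_best_col_by_name cols l =
      match l.findSome? (eSel cols) with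
      | some c => some c
      | none =>
        match l.findSome? (nSel cols) with
        | some c => some c
        | none => l.findSome? (sSel cols) := by
  unfold find_best_col_by_name
  have h2 : (fun cand =>
      (((cols.foldl (fun d c => d.insert c (pvNorm c)) PySem.Dict.empty).items).find?
        (fun p => p.2 == pvNorm cand)).map Prod.fst) = nSel cols := by
    funext cand
    rw [items_build]
    exact find?_pvItems cols (fun x => x == pvNorm cand)
  have h3 : (fun cand =>
      (((cols.foldl (fun d c => d.insert c (pvNorm c)) PySem.Dict.empty).items).find?
        (fun p => PySem.Str.isIn (pvNorm cand) p.2)).map Prod.fst) = sSel cols := by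
    funext cand
    rw [items_build]
    exact find?_pvItems cols (fun x => PySem.Str.isIn (pvNorm cand) x)
  simp only [h2, h3]
  rfl

-- ===== VERDICT (by name: the statement is the Claim_ definition above) =====
theorem find_best_col_by_name_spec : Claim_equal_find_best_col_by_name := by
  intro cols l _dom
  show find_best_col_by_name cols l = find_best_col_by_name_alt cols l
  rw [A_eq]
  unfold find_best_col_by_name_alt
  rw [loop0]
  unfold pvSpecSel
  cases l.findSome? (eSel cols) with
  | some c => rfl
  | none =>
    cases l.findSome? (nSel cols) with
    | some c => rfl
    | none => cases l.findSome? (sSel cols) <;> rfl
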